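-- pv_equiv track=rewrite | github.com/ayushz-20/Virtual_Assistant | Backend/Automation.py | parse_complex_command
-- ===== SOURCE A (Python) =====
-- from typing import Dict, Callable, List, Optional, Tuple
--
-- def parse_complex_command(command: str) -> List[Tuple[str, str]]:
--     """Enhanced parser for complex commands"""
--     all_commands = []
--     current_action = None
--     apps = []
--
--     words = command.lower().split()
--     i = 0
--     while i < len(words):
--         word = words[i]
--
--         # Detect action words
--         if word in ['open', 'close', 'minimize']:
--             # Process previous action if exists
--             if current_action and apps:
--                 for app in apps:
--                     all_commands.append((current_action, app))
--             current_action = word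
--             apps = []
--         # Collect app names
--         elif word not in ['and', '&', ',']:
--             if current_action:
--                 apps.append(word)
--         i += 1
--
--     # Process final action
--     if current_action and apps:
--         for app in apps:
--             all_commands.append((current_action, app))
--
--     return all_commands
-- ===== SOURCE B (Python) =====
-- def parse_complex_command(command: str):
--     """Pair each app word with the currently active action directly; no buffer/flush."""
--     result = []
--     action = None
--     for word in command.lower().split():
--         if word in ('open', 'close', 'minimize'):
--             action = word
--         elif word not in ('and', '&', ','):
--             if action:
--                 result.append((action, word))
--     return result
-- ===== Notes on version B (the rewrite author's own statement) =====
-- stated objective: simpler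
-- what changed: Replaces A's buffer-then-flush scheme (apps list filled per action, flushed on the next action word and again after the loop) with direct single-pass accumulation: each app word is appended as (current_action, word) the moment it is read, eliminating the apps buffer and the duplicated flush code.
import Mathlib
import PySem

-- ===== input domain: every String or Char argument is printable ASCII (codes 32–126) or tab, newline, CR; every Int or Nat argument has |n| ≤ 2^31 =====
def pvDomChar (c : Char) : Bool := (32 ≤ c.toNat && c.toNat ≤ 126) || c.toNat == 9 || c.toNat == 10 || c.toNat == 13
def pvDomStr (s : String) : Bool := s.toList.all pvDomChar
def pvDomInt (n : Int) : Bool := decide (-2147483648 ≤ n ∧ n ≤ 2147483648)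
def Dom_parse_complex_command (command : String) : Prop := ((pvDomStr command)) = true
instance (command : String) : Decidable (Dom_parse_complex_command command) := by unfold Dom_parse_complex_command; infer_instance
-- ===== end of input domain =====

-- B replaces A's per-action apps buffer with its duplicated end-of-loop flush by direct
-- (action, word) accumulation at read time; objective: simpler.

-- ===== PORT A =====
-- final flush "if current_action and apps: for app in apps: append (current_action, app)"
-- (when current_action is None or apps is empty the flush appends nothing, exactly as here)
def flushA (act : Option String) (apps : List String) : List (String × String) :=
  match act with
  | none => []
  | some a => apps.map (fun app => (a, app))

-- the `while i < len(words)` loop, consuming words in order with state (all_commands, current_action, apps)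
def parseLoopA : List String → List (String × String) → Option String → List String → List (String × String)
  | [], all_commands, current_action, apps => all_commands ++ flushA current_action apps
  | word :: ws, all_commands, current_action, apps =>
    if word ∈ (["open", "close", "minimize"] : List String) then
      parseLoopA ws (all_commands ++ flushA current_action apps) (some word) []
    else if word ∈ (["and", "&", ","] : List String) then
      parseLoopA ws all_commands current_action apps
    else
      match current_action with
      | some _ => parseLoopA ws all_commands current_action (apps ++ [word])
      | none => parseLoopA ws all_commands current_action apps

def parse_complex_command (command : String) : List (String × String) :=
  parseLoopA (PySem.Str.split₀ (PySem.Str.lower command)) [] none []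

-- ===== PORT B =====
def parseLoopB : List String → List (String × String) → Option String → List (String × String)
  | [], result, _ => result
  | word :: ws, result, action =>
    if word ∈ (["open", "close", "minimize"] : List String) then
      parseLoopB ws result (some word)
    else if word ∈ (["and", "&", ","] : List String) then
      parseLoopB ws result action
    else
      match action with
      | some a => parseLoopB ws (result ++ [(a, word)]) action
      | none => parseLoopB ws result action

def parse_complex_command_alt (command : String) : List (String × String) :=
  parseLoopB (PySem.Str.split₀ (PySem.Str.lower command)) [] none

-- ===== PRECONDITION & SPEC =====
def Spec_parse_complex_command (command : String) (out : List (String × String)) : Prop := out = parse_complex_command_alt command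
instance (command : String) (out : List (String × String)) : Decidable (Spec_parse_complex_command command out) := by unfold Spec_parse_complex_command; infer_instance

-- ===== CLAIM (what is proved, stated in full; the proofs are below) =====
def Claim_equal_parse_complex_command : Prop := ∀ (command : String), Dom_parse_complex_command command → Spec_parse_complex_command command (parse_complex_command command)

-- ===== LEMMAS AND PROOFS =====
-- Invariant: A's pending buffer, flushed, is exactly what B has already accumulated.
theorem parseLoopA_eq_parseLoopB (ws : List String) :
    ∀ (acc : List (String × String)) (act : Option String) (apps : List String),
      parseLoopA ws acc act apps = parseLoopB ws (acc ++ flushA act apps) act := by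
  induction ws with
  | nil => intro acc act apps; simp [parseLoopA, parseLoopB]
  | cons w ws ih =>
    intro acc act apps
    by_cases h1 : w ∈ (["open", "close", "minimize"] : List String)
    · simp [parseLoopA, parseLoopB, h1, ih, flushA]
    · by_cases h2 : w ∈ (["and", "&", ","] : List String)
      · simp [parseLoopA, parseLoopB, h1, h2, ih]
      · cases act with
        | none => simp [parseLoopA, parseLoopB, h1, h2, ih, flushA]
        | some a => simp [parseLoopA, parseLoopB, h1, h2, ih, flushA]

-- ===== VERDICT (by name: the statement is the Claim_ definition above) =====
theorem parse_complex_command_spec : Claim_equal_parse_complex_command := by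
  intro command _
  unfold Spec_parse_complex_command parse_complex_command parse_complex_command_alt
  rw [parseLoopA_eq_parseLoopB]
  simp [flushA]
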